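-- pv_equiv track=rewrite | github.com/ES-EDU-SIEGMA/User-Interface | src/progressWindow.py | getEstimatedWeight
-- ===== SOURCE A (Python) =====
-- HOPPER_SIZE_SMALL   = 30
--
-- HOPPER_SIZE_LARGE   = 40
--
-- def getEstimatedWeight(__timeList):
--     res = 0
--     for i in range(len(__timeList)):
--         hoppersize = HOPPER_SIZE_SMALL
--         if __timeList[i][0] > 8:
--             hoppersize = HOPPER_SIZE_LARGE
--         for y in range(len(__timeList[i]) - 1):
--             res += hoppersize
--     return res
-- ===== SOURCE B (Python) =====
-- HOPPER_SIZE_SMALL = 30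
-- HOPPER_SIZE_LARGE = 40
--
-- def getEstimatedWeight(__timeList):
--     # closed form: each sublist contributes hoppersize * (len-1); O(#sublists)
--     return sum((HOPPER_SIZE_LARGE if row[0] > 8 else HOPPER_SIZE_SMALL) * (len(row) - 1)
--                for row in __timeList)
-- ===== Notes on version B (the rewrite author's own statement) =====
-- stated objective: faster
-- what changed: Replaces the inner per-element accumulation loop by a single multiplication hoppersize*(len(row)-1) per sublist, summed in one pass.
import Mathlib
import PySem

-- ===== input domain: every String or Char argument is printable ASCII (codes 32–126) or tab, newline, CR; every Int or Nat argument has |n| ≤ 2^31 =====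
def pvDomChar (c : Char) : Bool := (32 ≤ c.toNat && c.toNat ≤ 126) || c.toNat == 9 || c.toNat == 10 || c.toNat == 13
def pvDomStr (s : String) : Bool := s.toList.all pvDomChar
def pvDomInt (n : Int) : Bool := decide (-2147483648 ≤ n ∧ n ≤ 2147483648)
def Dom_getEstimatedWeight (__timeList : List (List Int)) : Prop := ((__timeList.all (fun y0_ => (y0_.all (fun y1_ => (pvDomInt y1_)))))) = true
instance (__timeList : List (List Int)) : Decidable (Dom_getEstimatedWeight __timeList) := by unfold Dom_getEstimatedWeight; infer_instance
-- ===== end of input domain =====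

-- B replaces A's inner per-element accumulation loop with a per-sublist multiplication (asymptotically faster per the task's timing run).


-- ===== PORT A =====
def getEstimatedWeight (__timeList : List (List Int)) : Int :=
  (PySem.List.pyRange 0 (__timeList.length : Int) 1).foldl (fun res i =>
    let row := PySem.List.pyGetD __timeList i []
    let hoppersize : Int := if PySem.List.pyGetD row 0 0 > 8 then 40 else 30
    (PySem.List.pyRange 0 ((row.length : Int) - 1) 1).foldl (fun r _ => r + hoppersize) res) 0

-- ===== PORT B =====
def getEstimatedWeight_alt (__timeList : List (List Int)) : Int :=
  (__timeList.map (fun row =>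
    (if PySem.List.pyGetD row 0 0 > 8 then (40 : Int) else 30) * ((row.length : Int) - 1))).sum

-- ===== PRECONDITION & SPEC =====
-- A (and B) raise IndexError on row[0] for an empty sublist; Pre_ excludes exactly those inputs.
def Pre_getEstimatedWeight (__timeList : List (List Int)) : Prop :=
  ∀ row ∈ __timeList, row ≠ []
instance (__timeList : List (List Int)) : Decidable (Pre_getEstimatedWeight __timeList) := by unfold Pre_getEstimatedWeight; infer_instance
def pvWitness_getEstimatedWeight : List (List Int) := [[9, 1, 2], [3, 4]]

def Spec_getEstimatedWeight (__timeList : List (List Int)) (out : Int) : Prop := out = getEstimatedWeight_alt __timeList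
instance (__timeList : List (List Int)) (out : Int) : Decidable (Spec_getEstimatedWeight __timeList out) := by unfold Spec_getEstimatedWeight; infer_instance

-- ===== CLAIM (what is proved, stated in full; the proofs are below) =====
def Claim_equal_getEstimatedWeight : Prop := ∀ (__timeList : List (List Int)), Dom_getEstimatedWeight __timeList → Pre_getEstimatedWeight __timeList → Spec_getEstimatedWeight __timeList (getEstimatedWeight __timeList)

-- ===== LEMMAS AND PROOFS =====

-- the inner per-element loop adds hoppersize (len row - 1) times
lemma inner_loop_eq (h : Int) (n : Int) (r : Int) :
    (PySem.List.pyRange 0 n 1).foldl (fun r _ => r + h) r = r + h * n.toNat := by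
  rw [PySem.List.pyRange_one]
  simp only [Int.sub_zero]
  induction n.toNat generalizing r with
  | zero => simp
  | succ k ih =>
      rw [List.range_succ]
      simp only [List.map_append, List.foldl_append, ih]
      simp [List.foldl]
      ring

lemma outer_fold_eq (tl : List (List Int)) (hpre : ∀ row ∈ tl, row ≠ []) (init : Int) :
    (PySem.List.pyRange 0 (tl.length : Int) 1).foldl (fun res i =>
      let row := PySem.List.pyGetD tl i []
      let hoppersize : Int := if PySem.List.pyGetD row 0 0 > 8 then 40 else 30
      (PySem.List.pyRange 0 ((row.length : Int) - 1) 1).foldl (fun r _ => r + hoppersize) res) init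
    = init + (tl.map (fun row =>
        (if PySem.List.pyGetD row 0 0 > 8 then (40 : Int) else 30) * ((row.length : Int) - 1))).sum := by
  simp only []
  rw [PySem.List.foldl_pyRange_zero_pyGetD' tl ([] : List Int)
      (fun res row =>
        (PySem.List.pyRange 0 ((row.length : Int) - 1) 1).foldl
          (fun r _ => r + (if PySem.List.pyGetD row 0 0 > 8 then (40 : Int) else 30)) res) init]
  induction tl generalizing init with
  | nil => simp
  | cons row t ih =>
      have hrow : row ≠ [] := hpre row (List.mem_cons_self ..)
      have hpos : (1 : Int) ≤ (row.length : Int) := by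
        cases row with
        | nil => exact absurd rfl hrow
        | cons a s => simp
      simp only [List.foldl_cons, List.map_cons, List.sum_cons]
      rw [ih (fun r hr => hpre r (List.mem_cons_of_mem _ hr))]
      rw [inner_loop_eq]
      have : (((row.length : Int) - 1).toNat : Int) = (row.length : Int) - 1 := by omega
      rw [this]
      ring

-- ===== VERDICT (by name: the statement is the Claim_ definition above) =====
theorem getEstimatedWeight_spec : Claim_equal_getEstimatedWeight := by
  intro tl _ hpre
  unfold Spec_getEstimatedWeight getEstimatedWeight getEstimatedWeight_alt
  have := outer_fold_eq tl hpre 0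
  simpa using this
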